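-- pv_equiv track=rewrite | github.com/hovanhoa/caro-ai | main.py | FindPossibleMove
-- ===== SOURCE A (Python) =====
-- def CheckIsIn(board, y, x):
--     return 0 <= y < len(board) and 0 <= x < len(board)
--
-- def March(board,y,x,dy,dx,length):
--     '''
--     tìm vị trí xa nhất trong dy,dx trong khoảng length
--
--     '''
--     yf = y + length*dy
--     xf = x + length*dx
--     # chừng nào yf,xf không có trong board
--     while not CheckIsIn(board, yf,xf):
--         yf -= dy
--         xf -= dx
--
--     return yf,xf
--
-- def FindPossibleMove(board):
--     '''
--     khởi tạo danh sách tọa độ có thể có tại danh giới các nơi đã đánh phạm vi 3 đơn vị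
--     '''
--     #mảng taken lưu giá trị của người chơi và của máy trên bàn cờ
--     taken = []
--     # mảng directions lưu hướng đi (8 hướng)
--     directions = [(0,1),(0,-1),(1,0),(-1,0),(1,1),(-1,-1),(-1,1),(1,-1)]
--     # cord: lưu các vị trí không đi
--     cord = {}
--
--     for i in range(len(board)):
--         for j in range(len(board)):
--             if board[i][j] != ' ':
--                 taken.append((i,j))
--     ''' duyệt trong hướng đi và mảng giá trị trên bàn cờ của người chơi và máy, kiểm tra nước không thể đi(trùng với
--     nước đã có trên bàn cờ)
--     '''
--     for direction in directions:
--         dy,dx = direction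
--         for coord in taken:
--             y,x = coord
--             for length in [1,2,3,4]:
--                 move = March(board,y,x,dy,dx,length)
--                 if move not in taken and move not in cord:
--                     cord[move]=False
--     return cord
-- ===== SOURCE B (Python) =====
-- def FindPossibleMove(board):
--     '''Gather empty cells within 4 steps of a taken cell along the 8 directions.'''
--     n = len(board)
--     taken = [(i, j) for i in range(n) for j in range(n) if board[i][j] != ' ']
--     directions = [(0, 1), (0, -1), (1, 0), (-1, 0), (1, 1), (-1, -1), (-1, 1), (1, -1)]
--     cells = [(y + k * dy, x + k * dx)
--              for dy, dx in directions
--              for y, x in taken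
--              for k in (1, 2, 3, 4)
--              if 0 <= y + k * dy < n and 0 <= x + k * dx < n
--              and board[y + k * dy][x + k * dx] == ' ']
--     return dict.fromkeys(cells, False)
-- ===== Notes on version B (the rewrite author's own statement) =====
-- stated objective: faster
-- what changed: Instead of A's per-(taken cell, direction, length) March clamp-walk followed by an O(|taken|) 'not in taken' list scan and incremental dict dedup, B generates candidate cells with a closed-form bounds filter, tests emptiness by direct board indexing, and deduplicates once at the end with dict.fromkeys.
import Mathlib
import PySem

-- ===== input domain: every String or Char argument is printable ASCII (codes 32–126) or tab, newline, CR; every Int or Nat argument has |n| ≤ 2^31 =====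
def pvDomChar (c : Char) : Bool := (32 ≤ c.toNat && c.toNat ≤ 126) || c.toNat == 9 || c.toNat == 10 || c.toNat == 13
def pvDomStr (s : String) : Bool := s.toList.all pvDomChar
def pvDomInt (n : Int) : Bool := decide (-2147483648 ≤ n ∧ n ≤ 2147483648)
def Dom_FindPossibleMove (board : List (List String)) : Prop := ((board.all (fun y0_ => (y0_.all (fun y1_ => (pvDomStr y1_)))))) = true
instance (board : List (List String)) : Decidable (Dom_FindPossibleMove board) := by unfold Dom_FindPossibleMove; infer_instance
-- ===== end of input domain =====

-- B replaces A's per-length March clamping and O(|taken|) duplicate scans by one bounds-filtered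
-- generation pass deduplicated at the end (dict.fromkeys); objective: faster (measured).

-- ===== PORT A =====
-- board[i][j], total via getD; exact whenever i < len(board) and j < len(board[i]),
-- which Pre_FindPossibleMove guarantees for every access either port performs.
def pvCell (board : List (List String)) (i j : Nat) : String := (board.getD i []).getD j ""

-- 'move not in cord': key-membership in the dict cord (keys are (Int × Int), flattened to triples)
def pvHasKey (cord : List (Int × Int × Bool)) (p : Int × Int) : Bool :=
  cord.any (fun e => e.1 == p.1 && e.2.1 == p.2)

def CheckIsIn (board : List (List String)) (y x : Int) : Bool :=
  decide (0 ≤ y ∧ y < (board.length : Int) ∧ 0 ≤ x ∧ x < (board.length : Int))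

-- the while-loop of March; the fuel only makes the loop total (on A's calls the loop
-- always terminates within length+1 iterations, so the port is exact there)
def marchGo (board : List (List String)) (dy dx : Int) : Nat → Int → Int → Int × Int
  | 0, yf, xf => (yf, xf)
  | fuel + 1, yf, xf =>
    if CheckIsIn board yf xf then (yf, xf) else marchGo board dy dx fuel (yf - dy) (xf - dx)

def March (board : List (List String)) (y x dy dx length : Int) : Int × Int :=
  marchGo board dy dx (length.toNat + 1) (y + length * dy) (x + length * dx)

def FindPossibleMove (board : List (List String)) : List (Int × Int × Bool) :=
  let n := board.length
  let taken : List (Int × Int) :=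
    (List.range n).foldl (fun acc i =>
      (List.range n).foldl (fun acc j =>
        if pvCell board i j ≠ " " then acc ++ [((i : Int), (j : Int))] else acc) acc) []
  let directions : List (Int × Int) := [(0,1),(0,-1),(1,0),(-1,0),(1,1),(-1,-1),(-1,1),(1,-1)]
  directions.foldl (fun cord d =>
    taken.foldl (fun cord c =>
      ([1,2,3,4] : List Int).foldl (fun cord len =>
        let move := March board c.1 c.2 d.1 d.2 len
        if move ∉ taken ∧ pvHasKey cord move = false then cord ++ [(move.1, move.2, false)]
        else cord) cord) cord) []

-- ===== PORT B =====
def FindPossibleMove_alt (board : List (List String)) : List (Int × Int × Bool) :=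
  let n := board.length
  let taken : List (Int × Int) :=
    (List.range n).flatMap (fun i =>
      (List.range n).filterMap (fun j =>
        if pvCell board i j ≠ " " then some ((i : Int), (j : Int)) else none))
  let directions : List (Int × Int) := [(0,1),(0,-1),(1,0),(-1,0),(1,1),(-1,-1),(-1,1),(1,-1)]
  let cells : List (Int × Int) :=
    directions.flatMap (fun d =>
      taken.flatMap (fun c =>
        ([1,2,3,4] : List Int).filterMap (fun k =>
          -- Python's short-circuit '0 <= Y < n and 0 <= X < n and board[Y][X] == " "':
          -- the cell is only read when Y, X are in range, so .toNat is exact here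
          if (0 ≤ c.1 + k * d.1 ∧ c.1 + k * d.1 < (n : Int) ∧
              0 ≤ c.2 + k * d.2 ∧ c.2 + k * d.2 < (n : Int)) ∧
             pvCell board (c.1 + k * d.1).toNat (c.2 + k * d.2).toNat = " "
          then some (c.1 + k * d.1, c.2 + k * d.2) else none)))
  (PySem.List.dedup cells).map (fun p => (p.1, p.2, false))

-- ===== PRECONDITION & SPEC =====
-- Pre_ excludes exactly the ragged boards (a row shorter than len(board)) on which the
-- Python A raises IndexError while scanning for taken cells; Python B raises there too.
def Pre_FindPossibleMove (board : List (List String)) : Prop :=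
  ∀ row ∈ board, board.length ≤ row.length
instance (board : List (List String)) : Decidable (Pre_FindPossibleMove board) := by
  unfold Pre_FindPossibleMove; infer_instance

def pvWitness_FindPossibleMove : List (List String) := [[" ", "x"], ["o", " "]]

def Spec_FindPossibleMove (board : List (List String)) (out : List (Int × Int × Bool)) : Prop :=
  out = FindPossibleMove_alt board
instance (board : List (List String)) (out : List (Int × Int × Bool)) :
    Decidable (Spec_FindPossibleMove board out) := by unfold Spec_FindPossibleMove; infer_instance

-- ===== CLAIM (what is proved, stated in full; the proofs are below) =====
def Claim_equal_FindPossibleMove : Prop :=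
  ∀ (board : List (List String)), Dom_FindPossibleMove board → Pre_FindPossibleMove board →
    Spec_FindPossibleMove board (FindPossibleMove board)

-- ===== LEMMAS AND PROOFS =====

-- the list of taken cells (definitionally the one B builds)
def pvTaken (board : List (List String)) : List (Int × Int) :=
  (List.range board.length).flatMap (fun i =>
    (List.range board.length).filterMap (fun j =>
      if pvCell board i j ≠ " " then some ((i : Int), (j : Int)) else none))

-- A's dict update on the key list (cord with its constant False values stripped)
def pvStepKey (taken : List (Int × Int)) (s : List (Int × Int)) (m : Int × Int) :
    List (Int × Int) :=
  if m ∉ taken ∧ m ∉ s then s ++ [m] else s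

def pvDirs : List (Int × Int) := [(0,1),(0,-1),(1,0),(-1,0),(1,1),(-1,-1),(-1,1),(1,-1)]

-- A's loop nest, restated on key lists
def pvKeyA (board : List (List String)) : List (Int × Int) :=
  pvDirs.foldl (fun s d =>
    (pvTaken board).foldl (fun s c =>
      ([1,2,3,4] : List Int).foldl (fun s l =>
        pvStepKey (pvTaken board) s (March board c.1 c.2 d.1 d.2 l)) s) s) []

-- B's dedup, restated as the same loop nest over B's candidate blocks
def pvKeyB (board : List (List String)) : List (Int × Int) :=
  pvDirs.foldl (fun s d =>
    (pvTaken board).foldl (fun s c =>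
      (([1,2,3,4] : List Int).filterMap (fun k =>
        if (0 ≤ c.1 + k * d.1 ∧ c.1 + k * d.1 < (board.length : Int) ∧
            0 ≤ c.2 + k * d.2 ∧ c.2 + k * d.2 < (board.length : Int)) ∧
           pvCell board (c.1 + k * d.1).toNat (c.2 + k * d.2).toNat = " "
        then some (c.1 + k * d.1, c.2 + k * d.2) else none)).foldl PySem.Set.add s) s) []

theorem pvHasKey_map (s : List (Int × Int)) (p : Int × Int) :
    pvHasKey (s.map (fun q => (q.1, q.2, false))) p = decide (p ∈ s) := by
  induction s with
  | nil => simp [pvHasKey]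
  | cons q t ih =>
    simp only [pvHasKey, List.map_cons, List.any_cons] at *
    rw [ih]
    by_cases h : p = q
    · subst h; simp
    · have hq : (q.1 == p.1 && q.2 == p.2) = false := by
        rcases Bool.eq_false_or_eq_true (q.1 == p.1 && q.2 == p.2) with ht | hf
        · exfalso; apply h
          simp only [Bool.and_eq_true, beq_iff_eq] at ht
          exact Prod.ext ht.1.symm ht.2.symm
        · exact hf
      simp [hq, h]

theorem pvFoldl_map_comm {α β γ : Type} (f : β → γ) (l : List α)
    (F : List γ → α → List γ) (G : List β → α → List β)
    (h : ∀ s a, F (s.map f) a = (G s a).map f) (s : List β) :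
    l.foldl F (s.map f) = (l.foldl G s).map f := by
  induction l generalizing s with
  | nil => rfl
  | cons a t ih => rw [List.foldl_cons, List.foldl_cons, h]; exact ih _

theorem pvTakenA_eq (board : List (List String)) :
    (List.range board.length).foldl (fun acc i =>
      (List.range board.length).foldl (fun acc j =>
        if pvCell board i j ≠ " " then acc ++ [((i : Int), (j : Int))] else acc) acc) [] =
    pvTaken board := by
  have hinner : ∀ (i : Nat) (acc : List (Int × Int)),
      (List.range board.length).foldl (fun acc j =>
        if pvCell board i j ≠ " " then acc ++ [((i : Int), (j : Int))] else acc) acc =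
      acc ++ (List.range board.length).filterMap (fun j =>
        if pvCell board i j ≠ " " then some ((i : Int), (j : Int)) else none) := by
    intro i acc
    rw [PySem.List.foldl_append_ite (p := fun j => pvCell board i j ≠ " ")
        (f := fun j => (((i : Nat) : Int), ((j : Nat) : Int)))]
    congr 1
    induction (List.range board.length) with
    | nil => rfl
    | cons a t ih =>
        simp only [ne_eq, decide_not, ite_not] at ih
        by_cases h : pvCell board i a = " " <;> simp [h, ih]
  calc (List.range board.length).foldl (fun acc i =>
      (List.range board.length).foldl (fun acc j =>
        if pvCell board i j ≠ " " then acc ++ [((i : Int), (j : Int))] else acc) acc) []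
      = (List.range board.length).foldl (fun acc i =>
          acc ++ (List.range board.length).filterMap (fun j =>
            if pvCell board i j ≠ " " then some ((i : Int), (j : Int)) else none)) [] := by
        apply PySem.List.foldl_congr_mem
        intro acc i _
        exact hinner i acc
    _ = pvTaken board := by
        rw [PySem.List.foldl_append_eq_flatMap]
        rfl

theorem pvMem_taken (board : List (List String)) (a b : Int) :
    (a, b) ∈ pvTaken board ↔
      ∃ i j : Nat, i < board.length ∧ j < board.length ∧ a = (i : Int) ∧ b = (j : Int) ∧
        pvCell board i j ≠ " " := by
  simp only [pvTaken, List.mem_flatMap, List.mem_filterMap, List.mem_range]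
  constructor
  · rintro ⟨i, hi, j, hj, hij⟩
    split at hij
    · rename_i hcell
      injection hij with h
      exact ⟨i, j, hi, hj, (Prod.ext_iff.mp h).1.symm, (Prod.ext_iff.mp h).2.symm, hcell⟩
    · simp at hij
  · rintro ⟨i, j, hi, hj, ha, hb, hcell⟩
    refine ⟨i, hi, j, hj, ?_⟩
    rw [if_pos hcell, ha, hb]

theorem pvTaken_bounds (board : List (List String)) (c : Int × Int) (hc : c ∈ pvTaken board) :
    0 ≤ c.1 ∧ c.1 < (board.length : Int) ∧ 0 ≤ c.2 ∧ c.2 < (board.length : Int) := by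
  obtain ⟨a, b⟩ := c
  rcases (pvMem_taken board a b).mp hc with ⟨i, j, hi, hj, ha, hb, _⟩
  subst ha; subst hb
  refine ⟨?_, ?_, ?_, ?_⟩ <;> simp <;> omega

theorem pvMem_taken_iff_cell (board : List (List String)) (a b : Int)
    (h : 0 ≤ a ∧ a < (board.length : Int) ∧ 0 ≤ b ∧ b < (board.length : Int)) :
    (a, b) ∈ pvTaken board ↔ pvCell board a.toNat b.toNat ≠ " " := by
  rw [pvMem_taken]
  constructor
  · rintro ⟨i, j, hi, hj, ha, hb, hcell⟩
    subst ha; subst hb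
    simpa using hcell
  · intro hcell
    refine ⟨a.toNat, b.toNat, ?_, ?_, ?_, ?_, hcell⟩ <;> omega

theorem pvCheckIsIn_mono (board : List (List String)) (y x dy dx j k : Int)
    (hd : (-1 ≤ dy ∧ dy ≤ 1) ∧ (-1 ≤ dx ∧ dx ≤ 1))
    (h0 : CheckIsIn board y x = true)
    (hk : CheckIsIn board (y + k * dy) (x + k * dx) = true)
    (hj : 0 ≤ j) (hjk : j ≤ k) :
    CheckIsIn board (y + j * dy) (x + j * dx) = true := by
  simp only [CheckIsIn, decide_eq_true_eq] at *
  have hdy : dy = -1 ∨ dy = 0 ∨ dy = 1 := by omega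
  have hdx : dx = -1 ∨ dx = 0 ∨ dx = 1 := by omega
  rcases hdy with h1 | h1 | h1 <;> rcases hdx with h2 | h2 | h2 <;> subst h1 <;> subst h2 <;>
    simp only [mul_neg_one, mul_zero, mul_one] at * <;> omega

theorem pvMarch_stop (board : List (List String)) (y x dy dx l : Int)
    (h : CheckIsIn board (y + l * dy) (x + l * dx) = true) :
    March board y x dy dx l = (y + l * dy, x + l * dx) := by
  simp [March, marchGo, h]

theorem pvMarch_down (board : List (List String)) (y x dy dx l : Int) (hl : 1 ≤ l)
    (h : CheckIsIn board (y + l * dy) (x + l * dx) = false) :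
    March board y x dy dx l = March board y x dy dx (l - 1) := by
  have h1 : l.toNat + 1 = ((l - 1).toNat + 1) + 1 := by omega
  have e1 : y + l * dy - dy = y + (l - 1) * dy := by ring
  have e2 : x + l * dx - dx = x + (l - 1) * dx := by ring
  unfold March
  rw [h1]
  simp only [marchGo, h, Bool.false_eq_true, if_false, e1, e2]

theorem pvStepKey_idem (taken : List (Int × Int)) (s : List (Int × Int)) (m : Int × Int) :
    pvStepKey taken (pvStepKey taken s m) m = pvStepKey taken s m := by
  unfold pvStepKey
  by_cases h1 : m ∈ taken
  · simp [h1]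
  · by_cases h2 : m ∈ s
    · simp [h1, h2]
    · simp [h1, h2]

theorem pvStepKey_eq_add (board : List (List String)) (m : Int × Int)
    (h : 0 ≤ m.1 ∧ m.1 < (board.length : Int) ∧ 0 ≤ m.2 ∧ m.2 < (board.length : Int))
    (s : List (Int × Int)) :
    pvStepKey (pvTaken board) s m =
      if pvCell board m.1.toNat m.2.toNat = " " then PySem.Set.add s m else s := by
  obtain ⟨a, b⟩ := m
  have hmem := pvMem_taken_iff_cell board a b h
  unfold pvStepKey
  by_cases hc : pvCell board a.toNat b.toNat = " "
  · rw [if_pos hc]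
    have : (a, b) ∉ pvTaken board := by rw [hmem]; simp [hc]
    by_cases hs : (a, b) ∈ s
    · rw [if_neg (by simp [hs]), PySem.Set.add, if_pos (by simpa [PySem.Set.contains])]
    · rw [if_pos ⟨this, hs⟩, PySem.Set.add, if_neg (by simpa [PySem.Set.contains])]
  · rw [if_neg hc, if_neg (by rw [hmem]; simp [hc])]

theorem pvBlock_eq (board : List (List String)) (d c : Int × Int)
    (hd : d ∈ ([(0,1),(0,-1),(1,0),(-1,0),(1,1),(-1,-1),(-1,1),(1,-1)] : List (Int × Int)))
    (hc : c ∈ pvTaken board) (s : List (Int × Int)) :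
    ([1,2,3,4] : List Int).foldl
        (fun s l => pvStepKey (pvTaken board) s (March board c.1 c.2 d.1 d.2 l)) s =
    (([1,2,3,4] : List Int).filterMap (fun k =>
        if (0 ≤ c.1 + k * d.1 ∧ c.1 + k * d.1 < (board.length : Int) ∧
            0 ≤ c.2 + k * d.2 ∧ c.2 + k * d.2 < (board.length : Int)) ∧
           pvCell board (c.1 + k * d.1).toNat (c.2 + k * d.2).toNat = " "
        then some (c.1 + k * d.1, c.2 + k * d.2) else none)).foldl PySem.Set.add s := by
  obtain ⟨y, x⟩ := c
  obtain ⟨dy, dx⟩ := d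
  have hb : (-1 ≤ dy ∧ dy ≤ 1) ∧ (-1 ≤ dx ∧ dx ≤ 1) := by fin_cases hd <;> norm_num
  have hcb := pvTaken_bounds board (y, x) hc
  dsimp only at hcb ⊢
  have h0 : CheckIsIn board y x = true := by
    simp only [CheckIsIn, decide_eq_true_eq]; exact hcb
  have mono : ∀ j k : Int, 0 ≤ j → j ≤ k →
      CheckIsIn board (y + k * dy) (x + k * dx) = true →
      CheckIsIn board (y + j * dy) (x + j * dx) = true :=
    fun j k hj hjk hk => pvCheckIsIn_mono board y x dy dx j k hb h0 hk hj hjk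
  have bnd : ∀ k : Int, CheckIsIn board (y + k * dy) (x + k * dx) = true →
      (0 ≤ y + k * dy ∧ y + k * dy < (board.length : Int) ∧
       0 ≤ x + k * dx ∧ x + k * dx < (board.length : Int)) := by
    intro k h; simpa [CheckIsIn] using h
  have nbnd : ∀ k : Int, CheckIsIn board (y + k * dy) (x + k * dx) = false →
      ¬ (0 ≤ y + k * dy ∧ y + k * dy < (board.length : Int) ∧
         0 ≤ x + k * dx ∧ x + k * dx < (board.length : Int)) := by
    intro k h hcon
    have : CheckIsIn board (y + k * dy) (x + k * dx) = true := by
      simpa [CheckIsIn] using hcon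
    rw [this] at h; exact absurd h (by simp)
  have hdown : ∀ j k : Int, 0 ≤ j → j ≤ k →
      CheckIsIn board (y + j * dy) (x + j * dx) = false →
      CheckIsIn board (y + k * dy) (x + k * dx) = false := by
    intro j k hj hjk hjf
    rcases Bool.eq_false_or_eq_true (CheckIsIn board (y + k * dy) (x + k * dx)) with h | h
    · exact absurd (mono j k hj hjk h) (by simp [hjf])
    · exact h
  have hstep0 : ∀ s : List (Int × Int), pvStepKey (pvTaken board) s (y, x) = s := by
    intro s; unfold pvStepKey; rw [if_neg (by simp [hc])]
  simp only [List.foldl_cons, List.foldl_nil, List.filterMap_cons, List.filterMap_nil]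
  rcases (Bool.eq_false_or_eq_true (CheckIsIn board (y + 1 * dy) (x + 1 * dx))).symm with h1 | h1
  · -- no step stays on the board: every March returns (y, x), every candidate is filtered out
    have h2 := hdown 1 2 (by norm_num) (by norm_num) h1
    have h3 := hdown 1 3 (by norm_num) (by norm_num) h1
    have h4 := hdown 1 4 (by norm_num) (by norm_num) h1
    have m1 : March board y x dy dx 1 = (y, x) := by
      rw [pvMarch_down board y x dy dx 1 (by norm_num) h1]
      norm_num
      rw [pvMarch_stop board y x dy dx 0 (by simpa using h0)]
      norm_num
    have m2 : March board y x dy dx 2 = (y, x) := by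
      rw [pvMarch_down board y x dy dx 2 (by norm_num) h2]; norm_num; exact m1
    have m3 : March board y x dy dx 3 = (y, x) := by
      rw [pvMarch_down board y x dy dx 3 (by norm_num) h3]; norm_num; exact m2
    have m4 : March board y x dy dx 4 = (y, x) := by
      rw [pvMarch_down board y x dy dx 4 (by norm_num) h4]; norm_num; exact m3
    rw [m1, m2, m3, m4]
    simp only [hstep0]
    have n1 : ¬((0 ≤ y + 1 * dy ∧ y + 1 * dy < (board.length : Int) ∧ 0 ≤ x + 1 * dx ∧ x + 1 * dx < (board.length : Int)) ∧ pvCell board (y + 1 * dy).toNat (x + 1 * dx).toNat = " ") := fun hcon => nbnd 1 h1 hcon.1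
    have n2 : ¬((0 ≤ y + 2 * dy ∧ y + 2 * dy < (board.length : Int) ∧ 0 ≤ x + 2 * dx ∧ x + 2 * dx < (board.length : Int)) ∧ pvCell board (y + 2 * dy).toNat (x + 2 * dx).toNat = " ") := fun hcon => nbnd 2 h2 hcon.1
    have n3 : ¬((0 ≤ y + 3 * dy ∧ y + 3 * dy < (board.length : Int) ∧ 0 ≤ x + 3 * dx ∧ x + 3 * dx < (board.length : Int)) ∧ pvCell board (y + 3 * dy).toNat (x + 3 * dx).toNat = " ") := fun hcon => nbnd 3 h3 hcon.1
    have n4 : ¬((0 ≤ y + 4 * dy ∧ y + 4 * dy < (board.length : Int) ∧ 0 ≤ x + 4 * dx ∧ x + 4 * dx < (board.length : Int)) ∧ pvCell board (y + 4 * dy).toNat (x + 4 * dx).toNat = " ") := fun hcon => nbnd 4 h4 hcon.1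
    rw [if_neg n1, if_neg n2, if_neg n3, if_neg n4]
    simp
  · rcases (Bool.eq_false_or_eq_true (CheckIsIn board (y + 2 * dy) (x + 2 * dx))).symm with h2 | h2
    · -- only one step stays on the board
      have h3 := hdown 2 3 (by norm_num) (by norm_num) h2
      have h4 := hdown 2 4 (by norm_num) (by norm_num) h2
      have m1 := pvMarch_stop board y x dy dx 1 h1
      have m2 : March board y x dy dx 2 = (y + 1 * dy, x + 1 * dx) := by
        rw [pvMarch_down board y x dy dx 2 (by norm_num) h2]; norm_num
        simpa using m1
      have m3 : March board y x dy dx 3 = (y + 1 * dy, x + 1 * dx) := by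
        rw [pvMarch_down board y x dy dx 3 (by norm_num) h3]; norm_num; simpa using m2
      have m4 : March board y x dy dx 4 = (y + 1 * dy, x + 1 * dx) := by
        rw [pvMarch_down board y x dy dx 4 (by norm_num) h4]; norm_num; simpa using m3
      rw [m1, m2, m3, m4]
      simp only [pvStepKey_idem]
      rw [pvStepKey_eq_add board (y + 1 * dy, x + 1 * dx) (bnd 1 h1) s]
      have n2 : ¬((0 ≤ y + 2 * dy ∧ y + 2 * dy < (board.length : Int) ∧ 0 ≤ x + 2 * dx ∧ x + 2 * dx < (board.length : Int)) ∧ pvCell board (y + 2 * dy).toNat (x + 2 * dx).toNat = " ") := fun hcon => nbnd 2 h2 hcon.1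
      have n3 : ¬((0 ≤ y + 3 * dy ∧ y + 3 * dy < (board.length : Int) ∧ 0 ≤ x + 3 * dx ∧ x + 3 * dx < (board.length : Int)) ∧ pvCell board (y + 3 * dy).toNat (x + 3 * dx).toNat = " ") := fun hcon => nbnd 3 h3 hcon.1
      have n4 : ¬((0 ≤ y + 4 * dy ∧ y + 4 * dy < (board.length : Int) ∧ 0 ≤ x + 4 * dx ∧ x + 4 * dx < (board.length : Int)) ∧ pvCell board (y + 4 * dy).toNat (x + 4 * dx).toNat = " ") := fun hcon => nbnd 4 h4 hcon.1
      rw [if_congr (and_iff_right (bnd 1 h1)) rfl rfl, if_neg n2, if_neg n3, if_neg n4]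
      by_cases hc1 : pvCell board (y + 1 * dy).toNat (x + 1 * dx).toNat = " " <;>
        simp only [one_mul] at hc1 <;> simp [hc1]
    · rcases (Bool.eq_false_or_eq_true (CheckIsIn board (y + 3 * dy) (x + 3 * dx))).symm with h3 | h3
      · have h4 := hdown 3 4 (by norm_num) (by norm_num) h3
        have m1 := pvMarch_stop board y x dy dx 1 h1
        have m2 := pvMarch_stop board y x dy dx 2 h2
        have m3 : March board y x dy dx 3 = (y + 2 * dy, x + 2 * dx) := by
          rw [pvMarch_down board y x dy dx 3 (by norm_num) h3]; norm_num; simpa using m2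
        have m4 : March board y x dy dx 4 = (y + 2 * dy, x + 2 * dx) := by
          rw [pvMarch_down board y x dy dx 4 (by norm_num) h4]; norm_num; simpa using m3
        rw [m1, m2, m3, m4]
        simp only [pvStepKey_idem]
        simp only [pvStepKey_eq_add board (y + 1 * dy, x + 1 * dx) (bnd 1 h1),
          pvStepKey_eq_add board (y + 2 * dy, x + 2 * dx) (bnd 2 h2)]
        have n3 : ¬((0 ≤ y + 3 * dy ∧ y + 3 * dy < (board.length : Int) ∧ 0 ≤ x + 3 * dx ∧ x + 3 * dx < (board.length : Int)) ∧ pvCell board (y + 3 * dy).toNat (x + 3 * dx).toNat = " ") := fun hcon => nbnd 3 h3 hcon.1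
        have n4 : ¬((0 ≤ y + 4 * dy ∧ y + 4 * dy < (board.length : Int) ∧ 0 ≤ x + 4 * dx ∧ x + 4 * dx < (board.length : Int)) ∧ pvCell board (y + 4 * dy).toNat (x + 4 * dx).toNat = " ") := fun hcon => nbnd 4 h4 hcon.1
        rw [if_congr (and_iff_right (bnd 1 h1)) rfl rfl,
            if_congr (and_iff_right (bnd 2 h2)) rfl rfl, if_neg n3, if_neg n4]
        dsimp only
        split_ifs <;> simp [PySem.Set.add]
      · rcases (Bool.eq_false_or_eq_true (CheckIsIn board (y + 4 * dy) (x + 4 * dx))).symm with h4 | h4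
        · have m1 := pvMarch_stop board y x dy dx 1 h1
          have m2 := pvMarch_stop board y x dy dx 2 h2
          have m3 := pvMarch_stop board y x dy dx 3 h3
          have m4 : March board y x dy dx 4 = (y + 3 * dy, x + 3 * dx) := by
            rw [pvMarch_down board y x dy dx 4 (by norm_num) h4]; norm_num; simpa using m3
          rw [m1, m2, m3, m4]
          simp only [pvStepKey_idem]
          simp only [pvStepKey_eq_add board (y + 1 * dy, x + 1 * dx) (bnd 1 h1), pvStepKey_eq_add board (y + 2 * dy, x + 2 * dx) (bnd 2 h2), pvStepKey_eq_add board (y + 3 * dy, x + 3 * dx) (bnd 3 h3)]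
          have n4 : ¬((0 ≤ y + 4 * dy ∧ y + 4 * dy < (board.length : Int) ∧ 0 ≤ x + 4 * dx ∧ x + 4 * dx < (board.length : Int)) ∧ pvCell board (y + 4 * dy).toNat (x + 4 * dx).toNat = " ") := fun hcon => nbnd 4 h4 hcon.1
          rw [if_congr (and_iff_right (bnd 1 h1)) rfl rfl,
              if_congr (and_iff_right (bnd 2 h2)) rfl rfl,
              if_congr (and_iff_right (bnd 3 h3)) rfl rfl, if_neg n4]
          dsimp only
          split_ifs <;> simp [PySem.Set.add]
        · have m1 := pvMarch_stop board y x dy dx 1 h1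
          have m2 := pvMarch_stop board y x dy dx 2 h2
          have m3 := pvMarch_stop board y x dy dx 3 h3
          have m4 := pvMarch_stop board y x dy dx 4 h4
          rw [m1, m2, m3, m4]
          simp only [pvStepKey_eq_add board (y + 1 * dy, x + 1 * dx) (bnd 1 h1),
            pvStepKey_eq_add board (y + 2 * dy, x + 2 * dx) (bnd 2 h2),
            pvStepKey_eq_add board (y + 3 * dy, x + 3 * dx) (bnd 3 h3),
            pvStepKey_eq_add board (y + 4 * dy, x + 4 * dx) (bnd 4 h4)]
          rw [if_congr (and_iff_right (bnd 1 h1)) rfl rfl,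
              if_congr (and_iff_right (bnd 2 h2)) rfl rfl,
              if_congr (and_iff_right (bnd 3 h3)) rfl rfl,
              if_congr (and_iff_right (bnd 4 h4)) rfl rfl]
          dsimp only
          split_ifs <;> simp [PySem.Set.add]

theorem pvA_eq (board : List (List String)) :
    FindPossibleMove board = (pvKeyA board).map (fun p => (p.1, p.2, false)) := by
  simp only [FindPossibleMove]
  rw [pvTakenA_eq]
  unfold pvKeyA pvDirs
  rw [show ([] : List (Int × Int × Bool)) =
      ([] : List (Int × Int)).map (fun p => (p.1, p.2, false)) from rfl]
  apply pvFoldl_map_comm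
  intro s d
  apply pvFoldl_map_comm
  intro s c
  apply pvFoldl_map_comm
  intro s l
  simp only [pvHasKey_map]
  unfold pvStepKey
  by_cases h1 : March board c.1 c.2 d.1 d.2 l ∈ pvTaken board
  · simp [h1]
  · by_cases h2 : March board c.1 c.2 d.1 d.2 l ∈ s
    · simp [h1, h2]
    · simp [h1, h2]

theorem pvB_eq (board : List (List String)) :
    FindPossibleMove_alt board = (pvKeyB board).map (fun p => (p.1, p.2, false)) := by
  simp only [FindPossibleMove_alt]
  rw [show (List.range board.length).flatMap (fun i =>
      (List.range board.length).filterMap (fun j =>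
        if pvCell board i j ≠ " " then some ((i : Int), (j : Int)) else none)) =
      pvTaken board from rfl]
  rw [PySem.List.dedup_eq_ofList, PySem.Set.ofList_eq_foldl]
  rw [List.foldl_flatMap]
  have h : ∀ (a : List (Int × Int)) (d : Int × Int),
      ((pvTaken board).flatMap (fun c =>
        ([1,2,3,4] : List Int).filterMap (fun k =>
          if (0 ≤ c.1 + k * d.1 ∧ c.1 + k * d.1 < (board.length : Int) ∧
              0 ≤ c.2 + k * d.2 ∧ c.2 + k * d.2 < (board.length : Int)) ∧
             pvCell board (c.1 + k * d.1).toNat (c.2 + k * d.2).toNat = " "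
          then some (c.1 + k * d.1, c.2 + k * d.2) else none))).foldl PySem.Set.add a =
      (pvTaken board).foldl (fun a c =>
        (([1,2,3,4] : List Int).filterMap (fun k =>
          if (0 ≤ c.1 + k * d.1 ∧ c.1 + k * d.1 < (board.length : Int) ∧
              0 ≤ c.2 + k * d.2 ∧ c.2 + k * d.2 < (board.length : Int)) ∧
             pvCell board (c.1 + k * d.1).toNat (c.2 + k * d.2).toNat = " "
          then some (c.1 + k * d.1, c.2 + k * d.2) else none)).foldl PySem.Set.add a) a :=
    fun a d => List.foldl_flatMap
  simp only [h]
  rfl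

theorem pvKey_eq (board : List (List String)) : pvKeyA board = pvKeyB board := by
  unfold pvKeyA pvKeyB pvDirs
  apply PySem.List.foldl_congr_mem
  intro s d hd
  apply PySem.List.foldl_congr_mem
  intro s' c hc
  exact pvBlock_eq board d c hd hc s'

-- ===== VERDICT (by name: the statement is the Claim_ definition above) =====
theorem FindPossibleMove_spec : Claim_equal_FindPossibleMove := by
  unfold Claim_equal_FindPossibleMove
  intro board _ _
  unfold Spec_FindPossibleMove
  rw [pvA_eq, pvB_eq, pvKey_eq]
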